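-- pv_equiv track=rewrite | github.com/Decim123/psychology_bot | bot/services/services.py | format_users_page
-- ===== SOURCE A (Python) =====
-- def format_users_page(users_list, page, max_chars=3000):
--     total_chars = 0
--     users_on_page = []
--     for user in users_list:
--         user_str = f"{user}\n"
--         if total_chars + len(user_str) <= max_chars:
--             users_on_page.append(user_str)
--             total_chars += len(user_str)
--         else:
--             break
--     return "".join(users_on_page), len(users_list) - len(users_on_page)
-- ===== SOURCE B (Python) =====
-- def format_users_page(users_list, page, max_chars=3000):
--     # Phase 1: format every entry and build the running cumulative lengths.
--     strs = [f"{user}\n" for user in users_list]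
--     sums = []
--     t = 0
--     for s in strs:
--         t += len(s)
--         sums.append(t)
--     # Phase 2: the cutoff is the number of running totals within the limit
--     # (cumulative lengths are strictly increasing, each entry adds >= 1 char).
--     k = sum(1 for t in sums if t <= max_chars)
--     # Phase 3: assemble the page from the prefix.
--     return "".join(strs[:k]), len(users_list) - k
-- ===== Notes on version B (the rewrite author's own statement) =====
-- stated objective: alternative
-- what changed: Replaces A's fused accumulate-and-break loop with a three-phase decomposition: build all formatted strings and their cumulative lengths, count how many running totals stay within max_chars (valid because the totals are strictly increasing), then join that prefix.
import Mathlib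
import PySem

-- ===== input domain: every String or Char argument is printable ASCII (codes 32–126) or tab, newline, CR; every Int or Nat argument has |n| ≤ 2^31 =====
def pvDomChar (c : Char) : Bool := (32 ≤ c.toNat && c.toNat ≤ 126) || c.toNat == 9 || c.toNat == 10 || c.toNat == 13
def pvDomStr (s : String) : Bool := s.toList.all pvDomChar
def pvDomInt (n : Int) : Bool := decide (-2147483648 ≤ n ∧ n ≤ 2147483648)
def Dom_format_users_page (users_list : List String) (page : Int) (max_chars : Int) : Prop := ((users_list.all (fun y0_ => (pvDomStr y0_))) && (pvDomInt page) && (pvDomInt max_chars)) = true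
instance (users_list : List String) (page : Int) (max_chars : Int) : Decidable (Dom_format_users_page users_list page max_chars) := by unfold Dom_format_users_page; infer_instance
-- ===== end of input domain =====

-- B replaces A's fused accumulate-and-break loop with a three-phase decomposition
-- (format all entries, build cumulative lengths, count the totals within the limit,
-- join that prefix); same cost, objective: alternative structure.

-- ===== PORT A =====
-- A's for-loop with the break: structural recursion over users_list carrying
-- (total_chars, users_on_page) exactly as the Python loop does.
def fupLoopA (max_chars : Int) : List String → Int → List String → List String
  | [], _, users_on_page => users_on_page
  | user :: rest, total_chars, users_on_page =>
      let user_str := user ++ "\n"          -- f"{user}\n"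
      if total_chars + PySem.Str.len user_str ≤ max_chars then
        fupLoopA max_chars rest (total_chars + PySem.Str.len user_str) (users_on_page ++ [user_str])
      else
        users_on_page                        -- break

def format_users_page (users_list : List String) (page : Int) (max_chars : Int) : String × Int :=
  let users_on_page := fupLoopA max_chars users_list 0 []
  (PySem.Str.join "" users_on_page, (users_list.length : Int) - users_on_page.length)

-- ===== PORT B =====
def format_users_page_alt (users_list : List String) (page : Int) (max_chars : Int) : String × Int :=
  -- Phase 1: strs = [f"{user}\n" for user in users_list], and the running totals
  let strs := users_list.map (fun user => user ++ "\n")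
  let sums := (strs.foldl (fun (st : Int × List Int) s =>
      (st.1 + PySem.Str.len s, st.2 ++ [st.1 + PySem.Str.len s])) (0, [])).2
  -- Phase 2: k = sum(1 for t in sums if t <= max_chars)
  let k : Int := (sums.map (fun t => if t ≤ max_chars then (1 : Int) else 0)).sum
  -- Phase 3: "".join(strs[:k]), len(users_list) - k
  (PySem.Str.join "" (PySem.List.slice strs none (some k)), (users_list.length : Int) - k)

-- ===== PRECONDITION & SPEC =====
def Spec_format_users_page (users_list : List String) (page : Int) (max_chars : Int) (out : String × Int) : Prop := out = format_users_page_alt users_list page max_chars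
instance (users_list : List String) (page : Int) (max_chars : Int) (out : String × Int) : Decidable (Spec_format_users_page users_list page max_chars out) := by unfold Spec_format_users_page; infer_instance

-- ===== CLAIM (what is proved, stated in full; the proofs are below) =====
def Claim_equal_format_users_page : Prop := ∀ (users_list : List String) (page : Int) (max_chars : Int), Dom_format_users_page users_list page max_chars → Spec_format_users_page users_list page max_chars (format_users_page users_list page max_chars)

-- ===== LEMMAS AND PROOFS =====

-- Functional form of the B-side prefix-sum loop.
def fupSums (t : Int) : List String → List Int
  | [] => []
  | s :: rest => (t + PySem.Str.len s) :: fupSums (t + PySem.Str.len s) rest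

theorem fupSums_foldl (strs : List String) : ∀ (t : Int) (acc : List Int),
    (strs.foldl (fun (st : Int × List Int) s =>
      (st.1 + PySem.Str.len s, st.2 ++ [st.1 + PySem.Str.len s])) (t, acc)).2
    = acc ++ fupSums t strs := by
  induction strs with
  | nil => intro t acc; simp [fupSums]
  | cons s rest ih =>
      intro t acc
      simp only [List.foldl_cons]
      rw [ih]
      simp [fupSums]

theorem one_le_len_newline (u : String) : 1 ≤ PySem.Str.len (u ++ "\n") := by
  rw [PySem.Str.len_append]
  have h1 : PySem.Str.len "\n" = 1 := by decide
  have h2 : 0 ≤ PySem.Str.len u := by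
    simp [PySem.Str.len_eq]
  omega

theorem fupSums_mem_gt (strs : List String)
    (hs : ∀ s ∈ strs, 1 ≤ PySem.Str.len s) :
    ∀ (t x : Int), x ∈ fupSums t strs → t < x := by
  induction strs with
  | nil => intro t x hx; simp [fupSums] at hx
  | cons s rest ih =>
      intro t x hx
      have h1 : 1 ≤ PySem.Str.len s := hs s (by simp)
      rcases (by simpa [fupSums] using hx : x = t + PySem.Str.len s ∨ x ∈ fupSums (t + PySem.Str.len s) rest) with h | h
      · omega
      · have := ih (fun s hsmem => hs s (by simp [hsmem])) (t + PySem.Str.len s) x h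
        omega

-- The heart of the equivalence: A's break loop produces exactly the prefix of
-- strs selected by counting the running totals within the limit.
theorem fupLoopA_eq_take (mc : Int) (ul : List String) : ∀ (t : Int) (acc : List String),
    fupLoopA mc ul t acc
      = acc ++ (ul.map (fun u => u ++ "\n")).take
          ((fupSums t (ul.map (fun u => u ++ "\n"))).countP (fun x => x ≤ mc)) := by
  induction ul with
  | nil => intro t acc; simp [fupLoopA, fupSums]
  | cons u rest ih =>
      intro t acc
      by_cases h : t + PySem.Str.len (u ++ "\n") ≤ mc
      · have h' : t + ((u.length : Int) + 1) ≤ mc := by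
          simpa [PySem.Str.len_append, PySem.Str.len_eq] using h
        simp only [fupLoopA, List.map_cons, fupSums, List.countP_cons]
        rw [if_pos h, ih]
        simp [h', List.append_assoc, List.take_succ_cons]
      · have h' : ¬ t + ((u.length : Int) + 1) ≤ mc := by
          simpa [PySem.Str.len_append, PySem.Str.len_eq] using h
        have hz : (fupSums t ((u :: rest).map (fun u => u ++ "\n"))).countP (fun x => x ≤ mc) = 0 := by
          rw [List.countP_eq_zero]
          intro x hx
          have hmem : ∀ s ∈ (u :: rest).map (fun u => u ++ "\n"), 1 ≤ PySem.Str.len s := by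
            intro s hsm
            rcases List.mem_map.mp hsm with ⟨v, _, rfl⟩
            exact one_le_len_newline v
          rcases (by simpa [fupSums] using hx :
              x = t + PySem.Str.len (u ++ "\n") ∨
              x ∈ fupSums (t + PySem.Str.len (u ++ "\n")) (rest.map (fun u => u ++ "\n"))) with hh | hh
          · simp only [decide_eq_true_eq]; omega
          · have := fupSums_mem_gt (rest.map (fun u => u ++ "\n"))
              (fun s hsm => hmem s (by simp at hsm ⊢; tauto))
              (t + PySem.Str.len (u ++ "\n")) x hh
            simp only [decide_eq_true_eq]; omega
        rw [hz]
        simp [fupLoopA, h']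

theorem fupSums_length (strs : List String) : ∀ t, (fupSums t strs).length = strs.length := by
  induction strs with
  | nil => intro t; simp [fupSums]
  | cons s rest ih => intro t; simp [fupSums, ih]

-- ===== VERDICT (by name: the statement is the Claim_ definition above) =====
theorem format_users_page_spec : Claim_equal_format_users_page := by
  intro users_list page max_chars _
  unfold Spec_format_users_page format_users_page format_users_page_alt
  simp only [fupSums_foldl, fupLoopA_eq_take, List.nil_append]
  set strs := users_list.map (fun u => u ++ "\n") with hstrs
  set k := (fupSums 0 strs).countP (fun x => decide (x ≤ max_chars)) with hk
  have hsum : ((fupSums 0 strs).map (fun t => if t ≤ max_chars then (1 : Int) else 0)).sum = (k : Int) := by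
    simpa using PySem.List.sum_map_ite_one_zero (fun t => decide (t ≤ max_chars)) (fupSums 0 strs)
  have hkle : k ≤ strs.length := le_trans List.countP_le_length
    (le_of_eq (fupSums_length strs 0))
  have hslice : PySem.List.slice strs none (some ((k : Int))) = strs.take k := by
    rw [PySem.List.slice_to strs (by positivity)]
    simp
  simp only [hsum, hslice]
  have hlen : (strs.take k).length = k := by
    simp [List.length_take, Nat.min_eq_left hkle]
  rw [hlen]
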